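-- pv_equiv track=rewrite | github.com/sacha-ichbiah/delaunay_watershed | Delaunay-watershed_3d_github/.ipynb_checkpoints/Networkx_functions-checkpoint.py | combine_Map_list
-- ===== SOURCE A (Python) =====
-- def combine_Maps(Map1,Map2):
--     #The operation from Map2 has been done after the operation from Map1
--     Map_comb={}
--     for cluster_num in Map2 :
--         Map_comb[cluster_num]=[]
--         for num in Map2[cluster_num]:
--             Map_comb[cluster_num]+=list(Map1[num])
--     return(Map_comb)
--
-- def combine_Map_list(Maps):
--     if len(Maps)>1 :
--         Map_comb = Maps[-1]
--         for i in range(len(Maps)-2,-1,-1):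
--             Map_comb = combine_Maps(Maps[i],Map_comb)
--     else :
--         Map_comb = dict(zip(Maps[0].keys(),[list(Maps[0][key]) for key in Maps[0].keys()]))
--     return(Map_comb)
-- ===== SOURCE B (Python) =====
-- def combine_Map_list(Maps):
--     # Different decomposition: resolve each top-level cluster directly through
--     # the chain of lower maps, never building intermediate whole-map dicts.
--     top = Maps[-1]
--     result = {}
--     for cluster, nums in top.items():
--         indices = list(nums)
--         for M in reversed(Maps[:-1]):
--             indices = [x for idx in indices for x in M[idx]]
--         result[cluster] = indices
--     return result
-- ===== Notes on version B (the rewrite author's own statement) =====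
-- stated objective: simpler
-- what changed: Instead of repeatedly building whole intermediate dictionaries by folding combine_Maps over the map list, B resolves each top-level cluster's index list directly through the chain of lower maps, building the result dict once; the single-map special case disappears.
import Mathlib
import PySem

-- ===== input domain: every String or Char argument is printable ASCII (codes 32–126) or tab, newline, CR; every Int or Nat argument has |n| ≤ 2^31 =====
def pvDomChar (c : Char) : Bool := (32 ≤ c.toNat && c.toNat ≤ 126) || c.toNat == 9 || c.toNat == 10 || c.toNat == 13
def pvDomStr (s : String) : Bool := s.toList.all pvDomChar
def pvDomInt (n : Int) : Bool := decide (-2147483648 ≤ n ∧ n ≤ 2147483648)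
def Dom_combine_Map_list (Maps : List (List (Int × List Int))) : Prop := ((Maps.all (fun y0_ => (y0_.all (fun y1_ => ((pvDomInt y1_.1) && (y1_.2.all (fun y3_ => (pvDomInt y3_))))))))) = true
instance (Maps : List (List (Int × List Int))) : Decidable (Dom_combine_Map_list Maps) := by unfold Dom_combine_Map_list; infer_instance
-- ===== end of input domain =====

-- B resolves each top-level cluster directly through the chain of lower maps (no intermediate
-- whole-map dictionaries and no single-map special case); equivalence of return values on Pre_.


-- ===== PORT A =====
def combine_Maps (Map1 Map2 : PySem.Dict Int (List Int)) : PySem.Dict Int (List Int) :=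
  -- Map_comb={}; for cluster_num in Map2: Map_comb[cluster_num]=[]; for num in Map2[cluster_num]: Map_comb[cluster_num]+=list(Map1[num])
  -- (dict lookups use getD with default []: exact under Pre_, where every looked-up key is present)
  Map2.keys.foldl
    (fun mc cluster_num =>
      (Map2.getD cluster_num []).foldl
        (fun mc num => mc.insert cluster_num (mc.getD cluster_num [] ++ Map1.getD num []))
        (mc.insert cluster_num []))
    PySem.Dict.empty

def combine_Map_list (Maps : List (List (Int × List Int))) : List (Int × List Int) :=
  if PySem.List.len Maps > 1 then
    ((PySem.List.pyRange (PySem.List.len Maps - 2) (-1) (-1)).foldl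
        (fun mc i => combine_Maps (PySem.Dict.mk (PySem.List.pyGetD Maps i [])) mc)
        (PySem.Dict.mk (PySem.List.pyGetD Maps (-1) []))).items
  else
    -- dict(zip(Maps[0].keys(), [list(Maps[0][key]) for key in Maps[0].keys()]))
    (PySem.Dict.ofList
      (((PySem.Dict.mk (PySem.List.pyGetD Maps 0 [])).keys).zip
        (((PySem.Dict.mk (PySem.List.pyGetD Maps 0 [])).keys).map
          (fun key => (PySem.Dict.mk (PySem.List.pyGetD Maps 0 [])).getD key [])))).items

-- ===== PORT B =====
def combine_Map_list_alt (Maps : List (List (Int × List Int))) : List (Int × List Int) :=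
  -- top = Maps[-1]; for cluster, nums in top.items(): indices = list(nums);
  -- for M in reversed(Maps[:-1]): indices = [x for idx in indices for x in M[idx]]; result[cluster] = indices
  let top := PySem.Dict.mk (PySem.List.pyGetD Maps (-1) [])
  (top.items.foldl
      (fun result kv =>
        result.insert kv.1
          ((PySem.List.slice Maps none (some (-1))).reverse.foldl
            (fun indices M => indices.flatMap (fun idx => (PySem.Dict.mk M).getD idx []))
            kv.2))
      PySem.Dict.empty).items

-- ===== PRECONDITION & SPEC =====
-- chainOK Ms idxs: walking the lower maps top-down, every index that is looked up is a key
-- of the map it is looked up in (exactly the lookups Python A performs; a failed one is a KeyError).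
def chainOK : List (List (Int × List Int)) → List Int → Bool
  | [], _ => true
  | M :: rest, idxs =>
      idxs.all (fun i => (PySem.Dict.mk M).contains i) &&
      chainOK rest (idxs.flatMap (fun i => (PySem.Dict.mk M).getD i []))

-- Pre_ excludes exactly: empty Maps (A raises IndexError), chains in which some index reachable
-- from the top map is missing from the map it is looked up in (A raises KeyError), and association
-- lists with duplicate keys (a Python dict cannot represent them, so they are no Python input).
def Pre_combine_Map_list (Maps : List (List (Int × List Int))) : Prop :=
  Maps ≠ [] ∧ (∀ M ∈ Maps, (M.map Prod.fst).Nodup) ∧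
    chainOK Maps.dropLast.reverse ((Maps.getLast?.getD []).flatMap Prod.snd) = true
instance (Maps : List (List (Int × List Int))) : Decidable (Pre_combine_Map_list Maps) := by
  unfold Pre_combine_Map_list; infer_instance

def pvWitness_combine_Map_list : (List (List (Int × List Int))) :=
  [[(1, [2, 3]), (2, [4])], [(0, [1, 1, 2]), (7, [2])]]

def Spec_combine_Map_list (Maps : List (List (Int × List Int))) (out : List (Int × List Int)) : Prop := out = combine_Map_list_alt Maps
instance (Maps : List (List (Int × List Int))) (out : List (Int × List Int)) : Decidable (Spec_combine_Map_list Maps out) := by unfold Spec_combine_Map_list; infer_instance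

-- ===== CLAIM (what is proved, stated in full; the proofs are below) =====
def Claim_equal_combine_Map_list : Prop := ∀ (Maps : List (List (Int × List Int))), Dom_combine_Map_list Maps → Pre_combine_Map_list Maps → Spec_combine_Map_list Maps (combine_Map_list Maps)

-- ===== LEMMAS AND PROOFS =====

theorem pv_inner_aux (Map1 mc : PySem.Dict Int (List Int)) (c : Int) (vals : List Int) (acc : List Int) :
    vals.foldl (fun mc num => mc.insert c (mc.getD c [] ++ Map1.getD num [])) (mc.insert c acc)
      = mc.insert c (acc ++ vals.flatMap (fun num => Map1.getD num [])) := by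
  induction vals generalizing acc with
  | nil => simp
  | cons v vs ih =>
      simp only [List.foldl_cons, PySem.Dict.getD_insert_self, PySem.Dict.insert_insert_self, ih,
        List.flatMap_cons, List.append_assoc]

theorem pv_inner_loop (Map1 mc : PySem.Dict Int (List Int)) (c : Int) (vals : List Int) :
    vals.foldl (fun mc num => mc.insert c (mc.getD c [] ++ Map1.getD num [])) (mc.insert c [])
      = mc.insert c (vals.flatMap (fun num => Map1.getD num [])) := by
  simpa using pv_inner_aux Map1 mc c vals []

theorem pv_combine_Maps_items (Map1 Map2 : PySem.Dict Int (List Int)) (h : Map2.keys.Nodup) :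
    (combine_Maps Map1 Map2).items
      = Map2.items.map (fun kv => (kv.1, kv.2.flatMap (fun num => Map1.getD num []))) := by
  unfold combine_Maps
  simp only [pv_inner_loop]
  rw [show (fun (mc : PySem.Dict Int (List Int)) (c : Int) =>
        mc.insert c ((Map2.getD c []).flatMap (fun num => Map1.getD num [])))
      = (fun mc c => mc.insert (id c) ((fun c => (Map2.getD c []).flatMap (fun num => Map1.getD num [])) c)) from rfl]
  rw [PySem.Dict.items_foldl_insert_fresh Map2.keys id _ PySem.Dict.empty (by simp) (by simpa using h)]
  rw [PySem.Dict.items_eq_map_keys Map2 h []]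
  simp [List.map_map]
  rfl

theorem pv_countdown_aux {β : Type} (ys : List (List (Int × List Int)))
    (f : β → List (Int × List Int) → β) (init : β) :
    (PySem.List.pyRange ((ys.length : Int) - 1) (-1) (-1)).foldl
        (fun acc i => f acc (PySem.List.pyGetD ys i [])) init
      = ys.reverse.foldl f init := by
  induction ys using List.reverseRecOn generalizing init with
  | nil => simp [PySem.List.pyRange_neg_one_eq_nil]
  | append_singleton ws w ih =>
      rw [PySem.List.pyRange_neg_one_cons (by simp; omega)]
      simp only [List.foldl_cons]
      have hget : PySem.List.pyGetD (ws ++ [w]) ((ws.length : Int) + 1 - 1) [] = w := by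
        simp [PySem.List.pyGetD_natCast (ws ++ [w]) ws.length ([] : List (Int × List Int))]
      have hlen : ((ws ++ [w]).length : Int) - 1 = (ws.length : Int) + 1 - 1 := by simp
      rw [hlen, hget]
      have hcong : (PySem.List.pyRange ((ws.length : Int) + 1 - 1 - 1) (-1) (-1)).foldl
          (fun acc i => f acc (PySem.List.pyGetD (ws ++ [w]) i [])) (f init w)
          = (PySem.List.pyRange ((ws.length : Int) - 1) (-1) (-1)).foldl
          (fun acc i => f acc (PySem.List.pyGetD ws i [])) (f init w) := by
        rw [show (ws.length : Int) + 1 - 1 - 1 = (ws.length : Int) - 1 by ring]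
        apply PySem.List.foldl_congr_mem
        intro acc i hi
        rw [PySem.List.mem_pyRange_neg_one] at hi
        have h0 : (0:Int) ≤ i := by omega
        have h1 : i < (ws.length : Int) := by omega
        rw [PySem.List.pyGetD_eq_getElem _ _ h0 (by simp; omega),
            PySem.List.pyGetD_eq_getElem _ _ h0 (by simpa using h1)]
        rw [List.getElem_append_left (by omega)]
      rw [hcong, ih, List.reverse_append]
      simp

theorem pv_countdown {β : Type} (xs : List (List (Int × List Int)))
    (f : β → List (Int × List Int) → β) (init : β) :
    (PySem.List.pyRange (PySem.List.len xs - 2) (-1) (-1)).foldl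
        (fun acc i => f acc (PySem.List.pyGetD xs i [])) init
      = xs.dropLast.reverse.foldl f init := by
  rcases xs with _ | ⟨y, ys⟩
  · have : PySem.List.len ([] : List (List (Int × List Int))) - 2 = (-2 : Int) := by
      simp [PySem.List.len_eq]
    rw [this, PySem.List.pyRange_neg_one_eq_nil (by norm_num)]
    simp
  have hlen : PySem.List.len (y :: ys) - 2 = (((y :: ys).dropLast).length : Int) - 1 := by
    rw [PySem.List.len_eq, List.length_dropLast]
    push_cast [List.length_cons]
    omega
  rw [hlen, ← pv_countdown_aux (y :: ys).dropLast f init]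
  apply PySem.List.foldl_congr_mem
  intro acc i hi
  rw [PySem.List.mem_pyRange_neg_one] at hi
  have h0 : (0:Int) ≤ i := by omega
  have h1 : i < (((y :: ys).dropLast).length : Int) := by omega
  have h2' : i < (((y :: ys).length : Nat) : Int) := by
    have : ((y :: ys).dropLast).length = (y :: ys).length - 1 := List.length_dropLast
    omega
  rw [PySem.List.pyGetD_eq_getElem _ _ h0 (by omega),
      PySem.List.pyGetD_eq_getElem _ _ h0 (by omega)]
  rw [List.getElem_dropLast]

theorem pv_keys_combine (Map1 Map2 : PySem.Dict Int (List Int)) (h : Map2.keys.Nodup) :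
    (combine_Maps Map1 Map2).keys = Map2.keys := by
  have : (combine_Maps Map1 Map2).keys = (combine_Maps Map1 Map2).items.map (·.1) := rfl
  rw [this, pv_combine_Maps_items Map1 Map2 h, List.map_map]
  rfl

theorem pv_chain (Ms : List (List (Int × List Int))) (top : PySem.Dict Int (List Int))
    (h : top.keys.Nodup) :
    (Ms.foldl (fun mc M => combine_Maps (PySem.Dict.mk M) mc) top).items
      = top.items.map (fun kv =>
          (kv.1, Ms.foldl (fun idxs M => idxs.flatMap (fun idx => (PySem.Dict.mk M).getD idx [])) kv.2)) := by
  induction Ms generalizing top with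
  | nil => simp
  | cons M Ms ih =>
      simp only [List.foldl_cons]
      rw [ih _ (by rw [pv_keys_combine _ _ h]; exact h)]
      rw [pv_combine_Maps_items _ _ h, List.map_map]
      rfl

theorem pv_ofList_items (l : List (Int × List Int)) (h : (l.map Prod.fst).Nodup) :
    (PySem.Dict.ofList l).items = l := by
  show (l.foldl (fun acc p => acc.insert p.1 p.2) PySem.Dict.empty).items = l
  rw [PySem.Dict.items_foldl_insert_fresh l Prod.fst Prod.snd PySem.Dict.empty (by simp) h]
  simp
  rfl

-- B's port, rewritten as a map over the top-level items (needs distinct top-level keys)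
theorem pv_alt_eq (Maps : List (List (Int × List Int)))
    (h : (PySem.Dict.mk (PySem.List.pyGetD Maps (-1) [])).keys.Nodup) :
    combine_Map_list_alt Maps
      = (PySem.Dict.mk (PySem.List.pyGetD Maps (-1) [])).items.map (fun kv =>
          (kv.1, Maps.dropLast.reverse.foldl
            (fun idxs M => idxs.flatMap (fun idx => (PySem.Dict.mk M).getD idx [])) kv.2)) := by
  unfold combine_Map_list_alt
  rw [PySem.List.slice_to_neg_one]
  show ((PySem.Dict.mk (PySem.List.pyGetD Maps (-1) [])).items.foldl
      (fun result kv =>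
        result.insert kv.1
          (Maps.dropLast.reverse.foldl
            (fun indices M => indices.flatMap (fun idx => (PySem.Dict.mk M).getD idx [])) kv.2))
      PySem.Dict.empty).items = _
  have hfresh := PySem.Dict.items_foldl_insert_fresh
      ((PySem.Dict.mk (PySem.List.pyGetD Maps (-1) [])).items)
      (fun kv => kv.1)
      (fun kv => Maps.dropLast.reverse.foldl
        (fun indices M => indices.flatMap (fun idx => (PySem.Dict.mk M).getD idx [])) kv.2)
      PySem.Dict.empty (by simp) (by simpa [PySem.Dict.keys] using h)
  rw [hfresh]
  rfl

-- ===== VERDICT (by name: the statement is the Claim_ definition above) =====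
theorem combine_Map_list_spec : Claim_equal_combine_Map_list := by
  intro Maps _ hpre
  obtain ⟨hne, hnd, -⟩ := hpre
  have htop : (PySem.Dict.mk (PySem.List.pyGetD Maps (-1) [])).keys.Nodup := by
    rw [PySem.Dict.keys_mk, PySem.List.pyGetD_neg_one _ _ hne]
    exact hnd _ (List.getLast_mem hne)
  unfold Spec_combine_Map_list
  rw [pv_alt_eq Maps htop]
  unfold combine_Map_list
  by_cases hlen : PySem.List.len Maps > 1
  · rw [if_pos hlen]
    rw [pv_countdown Maps (fun mc M => combine_Maps (PySem.Dict.mk M) mc)]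
    rw [pv_chain _ _ htop]
  · rw [if_neg hlen]
    rcases Maps with _ | ⟨m, rest⟩
    · exact absurd rfl hne
    rcases rest with _ | ⟨m2, rest⟩
    · -- single map
      have hm : PySem.List.pyGetD [m] (0 : Int) ([] : List (Int × List Int)) = m :=
        PySem.List.pyGetD_zero_cons m [] []
      have hm1 : PySem.List.pyGetD [m] (-1 : Int) ([] : List (Int × List Int)) = m := by
        rw [PySem.List.pyGetD_neg_one _ _ hne]
        rfl
      rw [hm, hm1]
      have htop' : (PySem.Dict.mk m).keys.Nodup := by
        rw [PySem.Dict.keys_mk]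
        exact hnd m (by simp)
      have hkeys : (PySem.Dict.mk m).keys.zip
            ((PySem.Dict.mk m).keys.map (fun key => (PySem.Dict.mk m).getD key []))
          = (PySem.Dict.mk m).keys.map (fun k => (k, (PySem.Dict.mk m).getD k [])) :=
        Eq.symm List.map_prod_left_eq_zip
      rw [hkeys, ← PySem.Dict.items_eq_map_keys _ htop' []]
      rw [pv_ofList_items _ (by simpa using htop')]
      simp
    · exfalso
      apply hlen
      rw [PySem.List.len_eq]
      simp
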